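-- pv_equiv track=rewrite | github.com/FernandoCallasaca/Examanes--Python | 31_10_2021/2.py | contar_letras_repetidas
-- ===== SOURCE A (Python) =====
-- def contar_letras_repetidas(string):
--     string = string.lower()
--     letras_repetidas = 0
--     for i, l in enumerate(string):
--         if(string.index(l) == i):
--             if(string.count(l) > 1):
--                 letras_repetidas += string.count(l)
--     if(letras_repetidas != 0):
--         return letras_repetidas
--     else:
--         return 1
-- ===== SOURCE B (Python) =====
-- def contar_letras_repetidas(string):
--     s = sorted(string.lower())
--     n = len(s)
--     total = 0
--     i = 0
--     while i < n:
--         j = i + 1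
--         while j < n and s[j] == s[i]:
--             j += 1
--         if j - i > 1:
--             total += j - i
--         i = j
--     return total if total != 0 else 1
-- ===== Notes on version B (the rewrite author's own statement) =====
-- stated objective: alternative
-- what changed: Sorts the lowercased characters once and scans them with two index pointers over consecutive equal runs, adding each run length greater than 1, instead of A's per-position string.index/string.count rescans over the original string.
import Mathlib
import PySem

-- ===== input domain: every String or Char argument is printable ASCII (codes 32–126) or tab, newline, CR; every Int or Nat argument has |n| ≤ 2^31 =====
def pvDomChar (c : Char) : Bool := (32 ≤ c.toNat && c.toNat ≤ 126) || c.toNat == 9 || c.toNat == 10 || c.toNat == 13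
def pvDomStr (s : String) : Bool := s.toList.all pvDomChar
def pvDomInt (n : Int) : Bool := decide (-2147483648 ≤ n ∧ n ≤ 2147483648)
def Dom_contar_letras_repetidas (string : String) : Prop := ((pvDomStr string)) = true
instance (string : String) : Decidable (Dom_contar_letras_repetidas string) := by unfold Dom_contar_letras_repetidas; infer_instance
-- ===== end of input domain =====

-- B sorts the lowercased characters once and sums consecutive equal runs of length > 1 in a single two-pointer pass, instead of A's per-position index/count rescans (alternative algorithm).


-- ===== PORT A =====
def contar_letras_repetidas (string : String) : Int :=
  let s := (PySem.Str.lower string).toList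
  let letras_repetidas : Int := (PySem.List.enumerate s).foldl (fun acc p =>
    if (PySem.List.index? s p.2).map Int.ofNat = some p.1 then
      if (PySem.List.count s p.2 : Int) > 1 then acc + (PySem.List.count s p.2 : Int) else acc
    else acc) 0
  if letras_repetidas ≠ 0 then letras_repetidas else 1

-- ===== PORT B =====
-- inner while loop of Source B: advance j while j < n and s[j] == s[i]  (c is s[i];
-- the fuel argument only bounds the iteration count to make the loop total: fuel = s.length always suffices)
def pvInnerJ (s : List Char) (c : Char) : Nat → Nat → Nat
  | 0, j => j
  | fuel + 1, j =>
    if h : j < s.length then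
      if s[j] == c then pvInnerJ s c fuel (j + 1) else j
    else j

-- outer while loop of Source B over the run starts i, carrying total (fuel as above)
def pvOuter (s : List Char) : Nat → Nat → Int → Int
  | 0, _, total => total
  | fuel + 1, i, total =>
    if h : i < s.length then
      let j := pvInnerJ s s[i] s.length (i + 1)
      pvOuter s fuel j (if (j : Int) - (i : Int) > 1 then total + ((j : Int) - (i : Int)) else total)
    else total

def contar_letras_repetidas_alt (string : String) : Int :=
  let s := PySem.List.sorted ((PySem.Str.lower string).toList) (fun x => x) false
  let total := pvOuter s s.length 0 0
  if total ≠ 0 then total else 1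

-- ===== PRECONDITION & SPEC =====
def Spec_contar_letras_repetidas (string : String) (out : Int) : Prop := out = contar_letras_repetidas_alt string
instance (string : String) (out : Int) : Decidable (Spec_contar_letras_repetidas string out) := by unfold Spec_contar_letras_repetidas; infer_instance

-- ===== CLAIM (what is proved, stated in full; the proofs are below) =====
def Claim_equal_contar_letras_repetidas : Prop := ∀ (string : String), Dom_contar_letras_repetidas string → Spec_contar_letras_repetidas string (contar_letras_repetidas string)

-- ===== LEMMAS AND PROOFS =====

-- abstract form of Source B's run scan, used only by the proofs: one run per step via takeWhile/dropWhile
def pvRunScan (l : List Char) : Int :=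
  match l with
  | [] => 0
  | c :: rest =>
    let run : Int := (rest.takeWhile (· == c)).length + 1
    (if run > 1 then run else 0) + pvRunScan (rest.dropWhile (· == c))
termination_by l.length
decreasing_by
  simp only [List.length_cons]
  have := List.length_dropWhile_le (· == c) rest
  omega

-- the common value both programs compute before the `!= 0` check: sum of f(count) over the distinct elements
def pvDistinctSum (f : Int → Int) (l : List Char) : Int :=
  ((PySem.Set.ofList l).map (fun c => f (PySem.List.count l c : Int))).sum

-- Sum of f over the first-occurrence positions equals the sum of f over the distinct elements.
theorem pv_first_occ_sum (f : Char → Int) (cs : List Char) :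
    ((PySem.List.enumerate cs 0).map (fun p =>
      if (PySem.List.index? cs p.2).map Int.ofNat = some p.1 then f p.2 else 0)).sum
    = ((PySem.Set.ofList cs).map f).sum := by
  induction cs using List.reverseRecOn with
  | nil => simp [PySem.List.enumerate, PySem.Set.ofList]
  | append_singleton xs x ih =>
    rw [PySem.List.enumerate_append, PySem.List.enumerate_cons, PySem.List.enumerate_nil,
        PySem.Set.ofList_append_singleton]
    have hcongr : ∀ p ∈ PySem.List.enumerate xs 0,
        (if (PySem.List.index? (xs ++ [x]) p.2).map Int.ofNat = some p.1 then f p.2 else 0)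
        = (if (PySem.List.index? xs p.2).map Int.ofNat = some p.1 then f p.2 else 0) := by
      intro p hp
      obtain ⟨k, hk, rfl⟩ := (PySem.List.mem_enumerate_iff _ _ _).1 hp
      rw [PySem.List.index?_append_of_mem _ (List.getElem_mem hk)]
    by_cases hx : x ∈ xs
    · have hrest : PySem.List.index? (xs ++ [x]) x = PySem.List.index? xs x :=
        PySem.List.index?_append_of_mem _ hx
      obtain ⟨k, hik⟩ := Option.isSome_iff_exists.1 ((PySem.List.index?_isSome_iff _ _).2 hx)
      obtain ⟨hklt, -, -⟩ := PySem.List.getElem_of_index?_eq_some hik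
      rw [PySem.Set.add_of_mem ((PySem.Set.mem_ofList _ _).2 hx)]
      simp only [List.map_append, List.sum_append, List.map_cons, List.map_nil, List.sum_cons,
        List.sum_nil, List.map_congr_left hcongr, ih, hrest, hik]
      have hne : ¬ ((some (Int.ofNat k) : Option Int) = some ((0 : Int) + xs.length)) := by
        simp [Int.ofNat_eq_natCast]; omega
      simp only [Option.map_some]
      rw [if_neg hne]
      exact add_zero _
    · have hlast : PySem.List.index? (xs ++ [x]) x = some xs.length :=
        PySem.List.index?_append_singleton_self _ _ hx
      rw [PySem.Set.add_of_not_mem (fun h => hx ((PySem.Set.mem_ofList _ _).1 h))]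
      simp only [List.map_append, List.sum_append, List.map_cons, List.map_nil, List.sum_cons,
        List.sum_nil, List.map_congr_left hcongr, ih, hlast]
      simp

-- folding Set.add over d starting from a :: s distributes when a ∉ d
theorem pv_foldl_add_cons (a : Char) (s d : List Char) (h : a ∉ d) :
    List.foldl PySem.Set.add (a :: s) d = a :: List.foldl PySem.Set.add s d := by
  induction d generalizing s with
  | nil => rfl
  | cons x xs ih =>
    have hxa : x ≠ a := fun he => h (he ▸ List.mem_cons_self)
    have hs : PySem.Set.add (a :: s) x = a :: PySem.Set.add s x := by
      by_cases hm : x ∈ s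
      · rw [PySem.Set.add_of_mem hm, PySem.Set.add_of_mem (List.mem_cons_of_mem a hm)]
      · rw [PySem.Set.add_of_not_mem hm, PySem.Set.add_of_not_mem (by
          intro hc; rcases List.mem_cons.1 hc with h1 | h2
          · exact hxa h1
          · exact hm h2)]
        rfl
    simp only [List.foldl_cons, hs]
    exact ih _ (fun hx => h (List.mem_cons_of_mem x hx))


-- the inner loop computes the end of the current run (given enough fuel)
theorem pvInnerJ_eq (s : List Char) (c : Char) (fuel j : Nat) (hf : s.length ≤ fuel + j) :
    pvInnerJ s c fuel j = j + ((s.drop j).takeWhile (· == c)).length := by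
  induction fuel generalizing j with
  | zero =>
    rw [pvInnerJ, List.drop_eq_nil_of_le (by omega)]
    simp
  | succ fuel ih =>
    by_cases h : j < s.length
    · rw [pvInnerJ, dif_pos h, List.drop_eq_getElem_cons h, List.takeWhile_cons]
      by_cases hc : s[j] == c
      · rw [if_pos hc, if_pos hc, ih (j + 1) (by omega)]
        simp; omega
      · rw [if_neg hc, if_neg hc]
        simp
    · rw [pvInnerJ, dif_neg h, List.drop_eq_nil_of_le (by omega)]
      simp

-- dropping past the matched prefix is dropWhile
theorem pv_drop_length_takeWhile (p : Char → Bool) (l : List Char) :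
    l.drop ((l.takeWhile p).length) = l.dropWhile p := by
  induction l with
  | nil => rfl
  | cons x xs ih =>
    by_cases hp : p x
    · rw [List.takeWhile_cons, if_pos hp, List.dropWhile_cons, if_pos hp,
          List.length_cons, List.drop_succ_cons, ih]
    · rw [List.takeWhile_cons, if_neg hp, List.dropWhile_cons, if_neg hp,
          List.length_nil, List.drop_zero]

-- the index-based outer loop computes the abstract run scan of the remaining suffix
theorem pvOuter_eq (s : List Char) (fuel i : Nat) (total : Int) (hf : s.length ≤ fuel + i) :
    pvOuter s fuel i total = total + pvRunScan (s.drop i) := by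
  induction fuel generalizing i total with
  | zero =>
    rw [pvOuter, List.drop_eq_nil_of_le (by omega), pvRunScan]
    simp
  | succ fuel ih =>
    by_cases h : i < s.length
    · rw [pvOuter, dif_pos h]
      have hje : pvInnerJ s s[i] s.length (i + 1)
          = (i + 1) + (((s.drop (i + 1)).takeWhile (· == s[i])).length) :=
        pvInnerJ_eq s s[i] s.length (i + 1) (by omega)
      show pvOuter s fuel (pvInnerJ s s[i] s.length (i + 1))
          (if ((pvInnerJ s s[i] s.length (i + 1) : Int)) - (i : Int) > 1
            then total + (((pvInnerJ s s[i] s.length (i + 1) : Int)) - (i : Int)) else total)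
        = total + pvRunScan (s.drop i)
      rw [ih _ _ (by omega)]
      have hdropj : s.drop (pvInnerJ s s[i] s.length (i + 1))
          = (s.drop (i + 1)).dropWhile (· == s[i]) := by
        rw [hje, ← List.drop_drop, pv_drop_length_takeWhile]
      have hrun : ((pvInnerJ s s[i] s.length (i + 1) : Int)) - (i : Int)
          = ((((s.drop (i + 1)).takeWhile (· == s[i])).length : Nat) : Int) + 1 := by
        rw [hje]; push_cast; ring
      rw [hdropj, hrun, List.drop_eq_getElem_cons h, pvRunScan]
      split_ifs <;> ring
    · rw [pvOuter, dif_neg h, List.drop_eq_nil_of_le (by omega), pvRunScan]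
      simp

-- on a sorted list, the run scan computes the distinct-count sum
theorem pv_runScan_sorted (l : List Char) (hl : l.Pairwise (· ≤ ·)) :
    pvRunScan l = pvDistinctSum (fun k => if k > 1 then k else 0) l := by
  induction l using pvRunScan.induct with
  | case1 => simp [pvRunScan, pvDistinctSum, PySem.Set.ofList, PySem.Set.empty]
  | case2 c rest ih =>
    have ht : ∀ x ∈ rest.takeWhile (· == c), x = c := by
      intro x hx
      have := List.mem_takeWhile_imp hx
      exact eq_of_beq this
    have hrest : rest.takeWhile (· == c) ++ rest.dropWhile (· == c) = rest :=
      List.takeWhile_append_dropWhile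
    -- c does not occur in the dropped suffix (sortedness)
    have hcd : c ∉ rest.dropWhile (· == c) := by
      cases hdd : rest.dropWhile (· == c) with
      | nil => simp
      | cons x d' =>
        have hxc' : x ≠ c := by
          have hhead := List.head?_dropWhile_not (fun y => y == c) rest
          simp [hdd] at hhead
          exact hhead
        have hxmem : x ∈ rest :=
          (List.dropWhile_sublist _).subset (by rw [hdd]; exact List.mem_cons_self)
        have hcx : c ≤ x := (List.pairwise_cons.1 hl).1 x hxmem
        have hcltx : c < x := lt_of_le_of_ne hcx (Ne.symm hxc')
        have hdpair : (x :: d').Pairwise (· ≤ ·) :=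
          hdd ▸ List.Pairwise.sublist (List.dropWhile_sublist _) ((List.pairwise_cons.1 hl).2)
        intro hc
        rcases List.mem_cons.1 hc with h1 | h2
        · exact hxc' h1.symm
        · exact absurd ((List.pairwise_cons.1 hdpair).1 c h2) (not_le.2 hcltx)
    have hdpair : (rest.dropWhile (· == c)).Pairwise (· ≤ ·) :=
      List.Pairwise.sublist (List.dropWhile_sublist _) ((List.pairwise_cons.1 hl).2)
    -- counts
    have hct : List.count c (rest.takeWhile (· == c)) = (rest.takeWhile (· == c)).length :=
      List.count_eq_length.2 (fun b hb => (ht b hb).symm)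
    have hcd0 : List.count c (rest.dropWhile (· == c)) = 0 := List.count_eq_zero.2 hcd
    have hcrest : List.count c rest = (rest.takeWhile (· == c)).length := by
      conv_lhs => rw [← hrest]
      rw [List.count_append, hct, hcd0]
      omega
    have hcc : List.count c (c :: rest) = (rest.takeWhile (· == c)).length + 1 := by
      rw [List.count_cons_self, hcrest]
    have hcx : ∀ x, x ≠ c → List.count x (c :: rest) = List.count x (rest.dropWhile (· == c)) := by
      intro x hx
      have hxt : List.count x (rest.takeWhile (· == c)) = 0 :=
        List.count_eq_zero.2 (fun hm => hx (ht x hm))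
      rw [List.count_cons_of_ne (Ne.symm hx)]
      conv_lhs => rw [← hrest]
      rw [List.count_append, hxt, zero_add]
    -- the distinct set
    have hset : PySem.Set.ofList (c :: rest) = c :: PySem.Set.ofList (rest.dropWhile (· == c)) := by
      show List.foldl PySem.Set.add PySem.Set.empty (c :: rest) = _
      rw [List.foldl_cons]
      have h0 : PySem.Set.add PySem.Set.empty c = [c] := by
        rfl
      rw [h0]
      conv_lhs => rw [← hrest]
      rw [List.foldl_append]
      have h1 : List.foldl PySem.Set.add [c] (rest.takeWhile (· == c)) = [c] := by
        have : ∀ (t : List Char), (∀ x ∈ t, x = c) → List.foldl PySem.Set.add [c] t = [c] := by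
          intro t
          induction t with
          | nil => intro _; rfl
          | cons y ys ihy =>
            intro hall
            have hy : y = c := hall y List.mem_cons_self
            rw [List.foldl_cons, hy, PySem.Set.add_of_mem List.mem_cons_self]
            exact ihy (fun x hx => hall x (List.mem_cons_of_mem y hx))
        exact this _ ht
      rw [h1]
      exact pv_foldl_add_cons c [] _ hcd
    -- put everything together
    rw [pvRunScan]
    rw [ih hdpair]
    unfold pvDistinctSum
    rw [hset, List.map_cons, List.sum_cons]
    have hcount : (PySem.List.count (c :: rest) c : Int)
        = ((rest.takeWhile (· == c)).length : Int) + 1 := by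
      show ((List.count c (c :: rest) : Nat) : Int) = _
      rw [hcc]; push_cast; ring
    have hmap : (PySem.Set.ofList (rest.dropWhile (· == c))).map
          (fun x => if ((PySem.List.count (c :: rest) x : Int)) > 1
                    then ((PySem.List.count (c :: rest) x : Int)) else 0)
        = (PySem.Set.ofList (rest.dropWhile (· == c))).map
          (fun x => if ((PySem.List.count (rest.dropWhile (· == c)) x : Int)) > 1
                    then ((PySem.List.count (rest.dropWhile (· == c)) x : Int)) else 0) := by
      apply List.map_congr_left
      intro x hx
      have hxd : x ∈ rest.dropWhile (· == c) := (PySem.Set.mem_ofList _ _).1 hx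
      have hxc : x ≠ c := fun he => hcd (he ▸ hxd)
      have : PySem.List.count (c :: rest) x = PySem.List.count (rest.dropWhile (· == c)) x := by
        show List.count x (c :: rest) = List.count x (rest.dropWhile (· == c))
        exact hcx x hxc
      rw [this]
    rw [hmap, hcount]

-- the sum over distinct elements is invariant under permutation
theorem pv_distinctSum_perm (f : Int → Int) (l₁ l₂ : List Char) (hp : l₁.Perm l₂) :
    pvDistinctSum f l₁ = pvDistinctSum f l₂ := by
  unfold pvDistinctSum
  have hsp : (PySem.Set.ofList l₁).Perm (PySem.Set.ofList l₂) := by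
    rw [List.perm_ext_iff_of_nodup (PySem.Set.nodup_ofList _) (PySem.Set.nodup_ofList _)]
    intro a
    rw [PySem.Set.mem_ofList, PySem.Set.mem_ofList]
    exact hp.mem_iff
  have hcnt : ∀ x, (PySem.List.count l₁ x : Int) = (PySem.List.count l₂ x : Int) := by
    intro x
    show ((List.count x l₁ : Nat) : Int) = ((List.count x l₂ : Nat) : Int)
    rw [hp.count_eq]
  calc ((PySem.Set.ofList l₁).map (fun c => f (PySem.List.count l₁ c : Int))).sum
      = ((PySem.Set.ofList l₁).map (fun c => f (PySem.List.count l₂ c : Int))).sum := by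
        apply congrArg
        exact List.map_congr_left (fun x _ => by rw [hcnt x])
    _ = ((PySem.Set.ofList l₂).map (fun c => f (PySem.List.count l₂ c : Int))).sum :=
        (hsp.map _).sum_eq

-- ===== VERDICT (by name: the statement is the Claim_ definition above) =====
theorem contar_letras_repetidas_spec : Claim_equal_contar_letras_repetidas := by
  intro string _
  unfold Spec_contar_letras_repetidas contar_letras_repetidas contar_letras_repetidas_alt
  set cs := (PySem.Str.lower string).toList with hcs
  simp only []
  have hA : (PySem.List.enumerate cs 0).foldl (fun acc p =>
      if (PySem.List.index? cs p.2).map Int.ofNat = some p.1 then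
        if (PySem.List.count cs p.2 : Int) > 1 then acc + (PySem.List.count cs p.2 : Int) else acc
      else acc) 0
      = pvDistinctSum (fun k => if k > 1 then k else 0) cs := by
    rw [PySem.List.foldl_congr_mem' (g := fun acc p => acc +
        (if (PySem.List.index? cs p.2).map Int.ofNat = some p.1 then
          (if (PySem.List.count cs p.2 : Int) > 1 then (PySem.List.count cs p.2 : Int) else 0) else 0))]
    · rw [PySem.List.foldl_add, zero_add,
          pv_first_occ_sum (fun c => if (PySem.List.count cs c : Int) > 1 then (PySem.List.count cs c : Int) else 0) cs]
      rfl
    · intro p _ acc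
      split_ifs <;> omega
  have hB : pvOuter (PySem.List.sorted cs (fun x => x) false)
      (PySem.List.sorted cs (fun x => x) false).length 0 0
      = pvDistinctSum (fun k => if k > 1 then k else 0) cs := by
    rw [pvOuter_eq _ _ _ _ (by omega), List.drop_zero, zero_add,
        pv_runScan_sorted _ (PySem.List.sorted_pairwise cs (fun x => x))]
    exact pv_distinctSum_perm _ _ _ (PySem.List.sorted_perm cs (fun x => x) false)
  rw [hA, hB]
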